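-- pv_equiv track=rewrite | github.com/RuotianJoy/AI | dictfunction.py | count_bigger_than_s_dict
-- ===== SOURCE A (Python) =====
-- def intersection_size(set1, set2):
--     """计算两个集合的交集大小"""
--     return len(set1.intersection(set2))
--
-- def count_bigger_than_s_dict(k_dict, j_dict, s):
--     """
--     计算每个k集合与j集合相似度大于等于s的数量
--     返回字典，键是k的ID，值是满足条件的j的数量
--     """
--     counts = {}
--     for k_id, k_set in k_dict.items():
--         count = 0
--         for j_set in j_dict.values():
--             if intersection_size(k_set, j_set) >= s:
--                 count += 1
--         counts[k_id] = count
--     return counts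
-- ===== SOURCE B (Python) =====
-- def count_bigger_than_s_dict(k_dict, j_dict, s):
--     # Inverted index element -> list of j ids; per k, accumulate overlap counts
--     # only for j-sets sharing at least one element.
--     if s <= 0:
--         n = len(j_dict)
--         return {k_id: n for k_id in k_dict}
--     inv = {}
--     for j_id, j_set in j_dict.items():
--         for x in j_set:
--             inv.setdefault(x, []).append(j_id)
--     counts = {}
--     for k_id, k_set in k_dict.items():
--         overlap = {}
--         for x in k_set:
--             for j_id in inv.get(x, ()):
--                 overlap[j_id] = overlap.get(j_id, 0) + 1
--         counts[k_id] = sum(1 for v in overlap.values() if v >= s)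
--     return counts
-- ===== Notes on version B (the rewrite author's own statement) =====
-- stated objective: faster
-- what changed: Instead of scanning every (k,j) pair and computing each intersection, B builds an inverted index element->j-ids once and, per k-set, tallies overlap sizes only for j-sets that actually share an element (disjoint pairs are never touched); s<=0 is answered directly as len(j_dict).
import Mathlib
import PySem

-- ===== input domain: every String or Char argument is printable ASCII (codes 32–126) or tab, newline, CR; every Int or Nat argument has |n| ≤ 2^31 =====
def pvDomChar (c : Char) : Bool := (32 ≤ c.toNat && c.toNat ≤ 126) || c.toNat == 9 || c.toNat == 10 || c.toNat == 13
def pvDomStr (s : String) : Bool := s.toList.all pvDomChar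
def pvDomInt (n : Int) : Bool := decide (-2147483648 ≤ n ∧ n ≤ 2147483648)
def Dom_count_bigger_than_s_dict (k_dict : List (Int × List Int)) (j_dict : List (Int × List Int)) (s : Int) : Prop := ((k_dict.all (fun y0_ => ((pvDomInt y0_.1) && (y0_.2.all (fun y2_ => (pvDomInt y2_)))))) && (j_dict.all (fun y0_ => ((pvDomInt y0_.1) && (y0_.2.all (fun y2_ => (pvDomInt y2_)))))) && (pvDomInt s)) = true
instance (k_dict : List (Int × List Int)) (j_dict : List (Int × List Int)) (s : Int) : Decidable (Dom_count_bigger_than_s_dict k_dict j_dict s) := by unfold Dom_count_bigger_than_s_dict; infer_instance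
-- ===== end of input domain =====

-- B replaces A's pairwise intersection scan by an inverted index element → j-ids, so per
-- k-set only j-sets sharing an element are touched (timing: advisory; asymptotically less
-- work on sparse data). Both ports normalise the list/assoc-list arguments into
-- PySem.Set / PySem.Dict exactly as Python receives set/dict values.

-- ===== PORT A =====
def intersection_size (set1 set2 : PySem.Set Int) : Int :=
  PySem.Set.len (PySem.Set.inter set1 set2)

def count_bigger_than_s_dict (k_dict : List (Int × List Int)) (j_dict : List (Int × List Int)) (s : Int) : List (Int × Int) :=
  let kd := PySem.Dict.ofList (k_dict.map (fun p => (p.1, PySem.Set.ofList p.2)))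
  let jd := PySem.Dict.ofList (j_dict.map (fun p => (p.1, PySem.Set.ofList p.2)))
  (kd.items.foldl (fun counts p =>
      counts.insert p.1
        (jd.values.foldl (fun count j_set =>
            if intersection_size p.2 j_set ≥ s then count + 1 else count) (0 : Int)))
    PySem.Dict.empty).items

-- ===== PORT B =====
def count_bigger_than_s_dict_alt (k_dict : List (Int × List Int)) (j_dict : List (Int × List Int)) (s : Int) : List (Int × Int) :=
  let kd := PySem.Dict.ofList (k_dict.map (fun p => (p.1, PySem.Set.ofList p.2)))
  let jd := PySem.Dict.ofList (j_dict.map (fun p => (p.1, PySem.Set.ofList p.2)))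
  if s ≤ 0 then
    (kd.items.foldl (fun counts p => counts.insert p.1 (jd.size : Int)) PySem.Dict.empty).items
  else
    let inv := jd.items.foldl (fun inv p =>
        p.2.foldl (fun inv x => inv.modify x [] (· ++ [p.1])) inv) PySem.Dict.empty
    (kd.items.foldl (fun counts p =>
        let overlap := p.2.foldl (fun ov x =>
            (inv.getD x []).foldl (fun ov j => ov.modify j 0 (· + 1)) ov) PySem.Dict.empty
        counts.insert p.1 ((overlap.values.countP (fun v => s ≤ v) : Int)))
      PySem.Dict.empty).items

-- ===== PRECONDITION & SPEC =====
def Spec_count_bigger_than_s_dict (k_dict : List (Int × List Int)) (j_dict : List (Int × List Int)) (s : Int) (out : List (Int × Int)) : Prop := out = count_bigger_than_s_dict_alt k_dict j_dict s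
instance (k_dict : List (Int × List Int)) (j_dict : List (Int × List Int)) (s : Int) (out : List (Int × Int)) : Decidable (Spec_count_bigger_than_s_dict k_dict j_dict s out) := by unfold Spec_count_bigger_than_s_dict; infer_instance

-- ===== CLAIM (what is proved, stated in full; the proofs are below) =====
def Claim_equal_count_bigger_than_s_dict : Prop := ∀ (k_dict : List (Int × List Int)) (j_dict : List (Int × List Int)) (s : Int), Dom_count_bigger_than_s_dict k_dict j_dict s → Spec_count_bigger_than_s_dict k_dict j_dict s (count_bigger_than_s_dict k_dict j_dict s)

-- ===== LEMMAS AND PROOFS =====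

-- every item of a dict built by an insert-fold comes from the pair list (or the start dict)
theorem mem_items_foldl_insert {l : List (Int × List Int)} {d : PySem.Dict Int (List Int)}
    {q : Int × List Int} (h : q ∈ (l.foldl (fun d p => d.insert p.1 p.2) d).items) :
    q ∈ l ∨ q ∈ d.items := by
  induction l generalizing d with
  | nil => exact .inr h
  | cons a t ih =>
    rcases ih (by simpa using h) with h' | h'
    · exact .inl (List.mem_cons_of_mem _ h')
    · rcases ((PySem.Dict.mem_items_insert _ _ _ _).1 h') with h'' | h''
      · exact .inl (by simp [h''])
      · exact .inr h''.1

theorem mem_items_ofList {l : List (Int × List Int)} {q : Int × List Int}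
    (h : q ∈ (PySem.Dict.ofList l).items) : q ∈ l := by
  rcases mem_items_foldl_insert (d := PySem.Dict.empty) h with h' | h'
  · exact h'
  · simp [PySem.Dict.empty] at h'

-- values of the normalised dict are genuine sets (duplicate-free)
theorem nodup_snd_of_mem_items {l : List (Int × List Int)} {q : Int × List Int}
    (h : q ∈ (PySem.Dict.ofList (l.map (fun p => (p.1, PySem.Set.ofList p.2)))).items) :
    q.2.Nodup := by
  rcases List.mem_map.1 (mem_items_ofList h) with ⟨p, _, hp⟩
  simpa [← hp] using PySem.Set.nodup_ofList (xs := p.2)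

theorem count_flatMap {α β : Type} [DecidableEq β] (l : List α) (g : α → List β) (b : β) :
    (l.flatMap g).count b = (l.map (fun a => (g a).count b)).sum := by
  induction l with
  | nil => rfl
  | cons a t ih => simp [List.flatMap_cons, List.count_append, ih]

theorem sum_map_ite_one {α : Type} (l : List α) (p : α → Prop) [DecidablePred p] :
    (l.map (fun a => if p a then (1 : ℕ) else 0)).sum = l.countP (fun a => decide (p a)) := by
  induction l with
  | nil => rfl
  | cons a t ih => by_cases h : p a <;> simp [h, ih] <;> omega

-- a duplicate-free list filtered for equality with x
theorem filter_beq_of_nodup (l : List Int) (h : l.Nodup) (x : Int) :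
    l.filter (fun y => y == x) = if x ∈ l then [x] else [] := by
  induction l with
  | nil => simp
  | cons a t ih =>
    rcases List.nodup_cons.1 h with ⟨ha, ht⟩
    by_cases hax : a = x
    · subst hax
      have : t.filter (fun y => y == a) = [] := by
        rw [ih ht]; simp [ha]
      simp [List.filter_cons, this]
    · have : (a == x) = false := by simp [hax]
      rw [List.filter_cons_of_neg (by simp [this]), ih ht]
      by_cases hx : x ∈ t
      · simp [hx]
      · have hxa : ¬ x = a := fun h => hax h.symm
        simp [hxa, hx]

-- the inverted index: inv.getD x [] lists the j-ids whose set contains x, in jd order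
theorem inv_getD (jitems : List (Int × List Int)) (x : Int) :
    ((jitems.foldl (fun inv p => p.2.foldl (fun inv x => inv.modify x [] (· ++ [p.1])) inv)
        PySem.Dict.empty).getD x []) =
      jitems.flatMap (fun p => (p.2.filter (fun y => y == x)).map (fun _ => p.1)) := by
  have h1 : ∀ (d : PySem.Dict Int (List Int)),
      jitems.foldl (fun inv p => p.2.foldl (fun inv x => inv.modify x [] (· ++ [p.1])) inv) d
        = (jitems.flatMap (fun p => p.2.map (fun y => (y, p.1)))).foldl
            (fun d q => d.modify q.1 [] (· ++ [q.2])) d := by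
    intro d
    rw [List.foldl_flatMap]
    exact PySem.List.foldl_congr_mem _ _ _ _ (fun acc p _ => by rw [List.foldl_map])
  rw [h1, PySem.Dict.getD_foldl_modify_append, PySem.Dict.getD_empty]
  simp [List.filter_flatMap, List.map_flatMap, List.filter_map, Function.comp_def]

theorem count_flatMap_key (jitems : List (Int × List Int)) (hk : (jitems.map (·.1)).Nodup)
    {j : Int} {jv : List Int} (hmem : (j, jv) ∈ jitems) (g : Int × List Int → List Int)
    (hg : ∀ q, ∀ y ∈ g q, y = q.1) :
    (jitems.flatMap g).count j = (g (j, jv)).length := by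
  induction jitems with
  | nil => simp at hmem
  | cons a t ih =>
    simp only [List.map_cons, List.nodup_cons] at hk
    rcases List.mem_cons.1 hmem with h | h
    · subst h
      have ht : (t.flatMap g).count j = 0 := by
        rw [List.count_eq_zero]
        intro hj
        rcases List.mem_flatMap.1 hj with ⟨q, hq, hy⟩
        exact hk.1 (List.mem_map.2 ⟨q, hq, (hg q j hy).symm⟩)
      have ha : (g (j, jv)).count j = (g (j, jv)).length := by
        rw [List.count_eq_length]
        intro y hy; exact ((hg (j, jv) y hy)).symm
      simp [List.flatMap_cons, List.count_append, ht, ha]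
    · have ha : (g a).count j = 0 := by
        rw [List.count_eq_zero]
        intro hj
        exact hk.1 (List.mem_map.2 ⟨(j, jv), h, by
          have := hg a j hj; simp [this]⟩)
      simp [List.flatMap_cons, List.count_append, ha,
        ih (by exact hk.2) h]


-- ===== proof-only helpers =====

-- the inverted index built from jitems (B's first loop)
def invOf (jitems : List (Int × List Int)) : PySem.Dict Int (List Int) :=
  jitems.foldl (fun inv p => p.2.foldl (fun inv x => inv.modify x [] (· ++ [p.1])) inv)
    PySem.Dict.empty

-- B's overlap multiset, flattened: all j-ids hit by elements of kset
def hitsOf (jitems : List (Int × List Int)) (kset : List Int) : List Int :=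
  kset.flatMap (fun x => (invOf jitems).getD x [])

theorem intersection_size_eq (kset jv : List Int) :
    intersection_size kset jv = (kset.countP (fun x => decide (x ∈ jv)) : Int) := by
  simp [intersection_size, PySem.Set.inter, PySem.Set.len, List.countP_eq_length_filter]

theorem mem_inv_getD {jitems : List (Int × List Int)} {x j : Int} :
    j ∈ (invOf jitems).getD x [] ↔ ∃ p ∈ jitems, p.1 = j ∧ x ∈ p.2 := by
  rw [invOf, inv_getD]
  constructor
  · intro h
    rcases List.mem_flatMap.1 h with ⟨p, hp, hj⟩
    rcases List.mem_map.1 hj with ⟨y, hy, rfl⟩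
    rcases List.mem_filter.1 hy with ⟨hy1, hy2⟩
    have hyx : y = x := by simpa using hy2
    exact ⟨p, hp, rfl, hyx ▸ hy1⟩
  · rintro ⟨p, hp, rfl, hx⟩
    exact List.mem_flatMap.2 ⟨p, hp, List.mem_map.2 ⟨x, List.mem_filter.2 ⟨hx, by simp⟩, rfl⟩⟩

theorem count_hits {jitems : List (Int × List Int)} (hk : (jitems.map (·.1)).Nodup)
    (hv : ∀ q ∈ jitems, q.2.Nodup) (kset : List Int) {j : Int} {jv : List Int}
    (hmem : (j, jv) ∈ jitems) :
    (hitsOf jitems kset).count j = kset.countP (fun x => decide (x ∈ jv)) := by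
  rw [hitsOf, count_flatMap]
  have hx : ∀ x : Int, ((invOf jitems).getD x []).count j = if x ∈ jv then 1 else 0 := by
    intro x
    rw [invOf, inv_getD]
    rw [count_flatMap_key jitems hk hmem _ (fun q y hy => by
      rcases List.mem_map.1 hy with ⟨z, _, rfl⟩; rfl)]
    rw [List.length_map, filter_beq_of_nodup jv (hv _ hmem) x]
    by_cases h : x ∈ jv <;> simp [h]
  calc (kset.map (fun x => ((invOf jitems).getD x []).count j)).sum
      = (kset.map (fun x => if x ∈ jv then 1 else 0)).sum := by
        exact congrArg List.sum (List.map_congr_left (fun x _ => hx x))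
    _ = kset.countP (fun x => decide (x ∈ jv)) := sum_map_ite_one kset (· ∈ jv)

theorem mem_hits {jitems : List (Int × List Int)} {kset : List Int} {j : Int} :
    j ∈ hitsOf jitems kset ↔
      ∃ p ∈ jitems, p.1 = j ∧ 0 < kset.countP (fun x => decide (x ∈ p.2)) := by
  rw [hitsOf]
  constructor
  · intro h
    rcases List.mem_flatMap.1 h with ⟨x, hx, hj⟩
    rcases mem_inv_getD.1 hj with ⟨p, hp, h1, hxp⟩
    exact ⟨p, hp, h1, List.countP_pos_iff.2 ⟨x, hx, by simp [hxp]⟩⟩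
  · rintro ⟨p, hp, rfl, hpos⟩
    rcases List.countP_pos_iff.1 hpos with ⟨x, hx, hxp⟩
    exact List.mem_flatMap.2 ⟨x, hx, mem_inv_getD.2 ⟨p, hp, rfl, by simpa using hxp⟩⟩

-- the heart of the equivalence: per k-set, B's overlap-counter tally equals A's scan tally
theorem per_k_count (jitems : List (Int × List Int)) (hk : (jitems.map (·.1)).Nodup)
    (hv : ∀ q ∈ jitems, q.2.Nodup) (kset : List Int) (s : Int) (hs : 0 < s) :
    ((PySem.Set.ofList (hitsOf jitems kset)).countP
        (fun j => decide (s ≤ ((hitsOf jitems kset).count j : Int))))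
      = jitems.countP (fun p => decide (s ≤ intersection_size kset p.2)) := by
  have hF : ((jitems.filter
      (fun p => decide (0 < kset.countP (fun x => decide (x ∈ p.2))))).map (·.1)).Nodup :=
    hk.sublist (List.Sublist.map _ List.filter_sublist)
  have hperm : (PySem.Set.ofList (hitsOf jitems kset)).Perm
      ((jitems.filter
        (fun p => decide (0 < kset.countP (fun x => decide (x ∈ p.2))))).map (·.1)) := by
    refine (List.perm_ext_iff_of_nodup (PySem.Set.nodup_ofList _) hF).2 ?_
    intro j
    rw [PySem.Set.mem_ofList, mem_hits]
    simp only [List.mem_map, List.mem_filter, decide_eq_true_eq]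
    constructor
    · rintro ⟨p, hp, rfl, hpos⟩; exact ⟨p, ⟨hp, hpos⟩, rfl⟩
    · rintro ⟨p, ⟨hp, hpos⟩, rfl⟩; exact ⟨p, hp, rfl, hpos⟩
  rw [hperm.countP_eq, List.countP_map, List.countP_filter]
  refine List.countP_congr (fun p hp => ?_)
  have hpj : (p.1, p.2) ∈ jitems := by simpa using hp
  simp only [Function.comp_apply, Bool.and_eq_true, decide_eq_true_eq,
    count_hits hk hv kset hpj, intersection_size_eq]
  constructor
  · rintro ⟨h1, _⟩; exact h1
  · intro h1
    refine ⟨h1, ?_⟩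
    exact_mod_cast lt_of_lt_of_le hs h1

-- B's inner dict loop is the counter of the flattened hit list
theorem overlap_eq_counter (jitems : List (Int × List Int)) (kset : List Int) :
    kset.foldl (fun ov x => ((invOf jitems).getD x []).foldl
        (fun ov j => ov.modify j 0 (· + 1)) ov) PySem.Dict.empty
      = PySem.Dict.counter (hitsOf jitems kset) := by
  rw [PySem.Dict.counter_eq_foldl, hitsOf, List.foldl_flatMap]

-- A's inner loop value, per k-set
theorem aval_eq (jd : PySem.Dict Int (List Int)) (kset : List Int) (s : Int) :
    (jd.values.foldl (fun count j_set =>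
        if intersection_size kset j_set ≥ s then count + 1 else count) (0 : Int))
      = (jd.items.countP (fun p => decide (s ≤ intersection_size kset p.2)) : Int) := by
  rw [PySem.List.foldl_ite_add_one (p := fun j_set => intersection_size kset j_set ≥ s)]
  have : jd.values = jd.items.map (·.2) := rfl
  rw [this, List.countP_map]
  rw [zero_add]
  rfl

-- B's inner value, per k-set, equals A's (the s ≥ 1 case)
theorem bval_eq_aval (jitems : List (Int × List Int)) (hk : (jitems.map (·.1)).Nodup)
    (hv : ∀ q ∈ jitems, q.2.Nodup) (kset : List Int) (s : Int) (hs : 0 < s) :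
    (((kset.foldl (fun ov x => ((invOf jitems).getD x []).foldl
          (fun ov j => ov.modify j 0 (· + 1)) ov) PySem.Dict.empty).values.countP
        (fun v => s ≤ v) : ℕ) : Int)
      = (jitems.countP (fun p => decide (s ≤ intersection_size kset p.2)) : Int) := by
  rw [overlap_eq_counter]
  have hvals : (PySem.Dict.counter (hitsOf jitems kset)).values
      = (PySem.Set.ofList (hitsOf jitems kset)).map
          (fun j => (((hitsOf jitems kset).count j : Int))) := by
    have : (PySem.Dict.counter (hitsOf jitems kset)).values
        = (PySem.Dict.counter (hitsOf jitems kset)).items.map (·.2) := rfl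
    rw [this, PySem.Dict.items_counter, List.map_map]
    rfl
  rw [hvals, List.countP_map]
  exact_mod_cast congrArg Nat.cast (per_k_count jitems hk hv kset s hs)

-- ===== VERDICT (by name: the statement is the Claim_ definition above) =====
theorem count_bigger_than_s_dict_spec : Claim_equal_count_bigger_than_s_dict := by
  intro k_dict j_dict s _
  unfold Spec_count_bigger_than_s_dict count_bigger_than_s_dict count_bigger_than_s_dict_alt
  set jd := PySem.Dict.ofList (j_dict.map (fun p => (p.1, PySem.Set.ofList p.2))) with hjd
  set kd := PySem.Dict.ofList (k_dict.map (fun p => (p.1, PySem.Set.ofList p.2))) with hkd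
  have hk : (jd.items.map (·.1)).Nodup := by
    have h := PySem.Dict.nodup_keys_ofList (j_dict.map (fun p => (p.1, PySem.Set.ofList p.2)))
    rw [hjd]; exact h
  have hv : ∀ q ∈ jd.items, q.2.Nodup := fun q hq => nodup_snd_of_mem_items (by rw [hjd] at hq; exact hq)
  by_cases hs : s ≤ 0
  · rw [if_pos hs]
    refine congrArg PySem.Dict.items ?_
    refine PySem.List.foldl_congr_mem _ _ _ _ (fun acc p hp => ?_)
    congr 1
    rw [aval_eq]
    have hall : ∀ q ∈ jd.items, (decide (s ≤ intersection_size p.2 q.2)) = true := by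
      intro q hq
      simp only [decide_eq_true_eq]
      refine le_trans hs ?_
      rw [intersection_size_eq]
      exact Int.natCast_nonneg _
    rw [List.countP_eq_length.2 hall]
    rfl
  · rw [if_neg hs]
    refine congrArg PySem.Dict.items ?_
    refine PySem.List.foldl_congr_mem _ _ _ _ (fun acc p hp => ?_)
    congr 1
    rw [aval_eq]
    exact (bval_eq_aval jd.items hk hv p.2 s (not_le.1 hs)).symm
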